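-- pv_equiv track=rewrite | github.com/pmbechard/CodingChallenges | LeetCode/Python/easy/find_the_longest_balanced_substring_of_a_binary_string_2609.py | get_balanced_from
-- ===== SOURCE A (Python) =====
-- def get_balanced_from(index, s):
--     current = 2
--     l, r = index, index + 1
--     while l > 0 and r < len(s):
--         l -= 1
--         r += 1
--         if l < 0 or r == len(s): break
--         if s[l] == '0' and s[r] == '1':
--             current += 2
--         else:
--             break
--     return current
-- ===== SOURCE B (Python) =====
-- def get_balanced_from(index, s):
--     n = len(s)
--     a = 0
--     i = index - 1
--     while 0 <= i < n and s[i] == '0':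
--         a += 1
--         i -= 1
--     b = 0
--     j = index + 2
--     while 0 <= j < n and s[j] == '1':
--         b += 1
--         j += 1
--     return 2 + 2 * min(a, b)
-- ===== Notes on version B (the rewrite author's own statement) =====
-- stated objective: simpler
-- what changed: Replaced A's single interleaved outward while-loop over a (current,l,r) state with two independent directional run scans (consecutive '0's left of index, consecutive '1's right of index+1) combined as 2 + 2*min(a,b).
import Mathlib
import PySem

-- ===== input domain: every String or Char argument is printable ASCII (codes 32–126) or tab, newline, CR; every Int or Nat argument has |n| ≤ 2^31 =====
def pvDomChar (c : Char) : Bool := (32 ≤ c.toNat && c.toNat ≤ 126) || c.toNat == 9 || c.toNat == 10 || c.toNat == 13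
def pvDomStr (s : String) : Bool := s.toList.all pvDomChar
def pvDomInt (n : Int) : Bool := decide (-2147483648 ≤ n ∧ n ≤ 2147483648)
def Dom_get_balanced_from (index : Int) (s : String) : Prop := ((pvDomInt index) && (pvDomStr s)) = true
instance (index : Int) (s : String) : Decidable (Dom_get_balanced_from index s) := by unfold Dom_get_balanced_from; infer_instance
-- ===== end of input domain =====

-- B replaces A's single interleaved outward while-loop by two independent directional
-- run scans combined with 2 + 2*min (objective: simpler); return values proved equal on all inputs.

-- ===== PORT A =====
-- the while-loop of A, state (current, l, r); terminates since r strictly increases toward s.length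
def pvLoopA (chars : List Char) (current l r : Int) : Int :=
  if h : l > 0 ∧ r < (chars.length : Int) then
    -- l -= 1; r += 1
    if l - 1 < 0 ∨ r + 1 = (chars.length : Int) then current
    else if PySem.List.pyGet? chars (l - 1) = some '0' ∧ PySem.List.pyGet? chars (r + 1) = some '1' then
      pvLoopA chars (current + 2) (l - 1) (r + 1)
    else current
  else current
termination_by ((chars.length : Int) - r).toNat
decreasing_by omega

def get_balanced_from (index : Int) (s : String) : Int :=
  pvLoopA s.toList 2 index (index + 1)

-- ===== PORT B =====
-- left scan: count consecutive '0' at positions i, i-1, … while inside the string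
def pvCountLeft (chars : List Char) (i : Int) : Int :=
  if h : 0 ≤ i ∧ i < (chars.length : Int) then
    if PySem.List.pyGet? chars i = some '0' then pvCountLeft chars (i - 1) + 1 else 0
  else 0
termination_by (i + 1).toNat
decreasing_by omega

-- right scan: count consecutive '1' at positions j, j+1, … while inside the string
def pvCountRight (chars : List Char) (j : Int) : Int :=
  if h : 0 ≤ j ∧ j < (chars.length : Int) then
    if PySem.List.pyGet? chars j = some '1' then pvCountRight chars (j + 1) + 1 else 0
  else 0
termination_by ((chars.length : Int) - j).toNat
decreasing_by omega

def get_balanced_from_alt (index : Int) (s : String) : Int :=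
  2 + 2 * min (pvCountLeft s.toList (index - 1)) (pvCountRight s.toList (index + 2))

-- ===== PRECONDITION & SPEC =====
def Spec_get_balanced_from (index : Int) (s : String) (out : Int) : Prop := out = get_balanced_from_alt index s
instance (index : Int) (s : String) (out : Int) : Decidable (Spec_get_balanced_from index s out) := by unfold Spec_get_balanced_from; infer_instance

-- ===== CLAIM (what is proved, stated in full; the proofs are below) =====
def Claim_equal_get_balanced_from : Prop := ∀ (index : Int) (s : String), Dom_get_balanced_from index s → Spec_get_balanced_from index s (get_balanced_from index s)

-- ===== LEMMAS AND PROOFS =====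

theorem pvCountLeft_out (chars : List Char) (i : Int)
    (h : ¬ (0 ≤ i ∧ i < (chars.length : Int))) : pvCountLeft chars i = 0 := by
  rw [pvCountLeft.eq_def, dif_neg h]

theorem pvCountRight_out (chars : List Char) (j : Int)
    (h : ¬ (0 ≤ j ∧ j < (chars.length : Int))) : pvCountRight chars j = 0 := by
  rw [pvCountRight.eq_def, dif_neg h]

theorem pvCountLeft_nonneg (chars : List Char) (i : Int) : 0 ≤ pvCountLeft chars i := by
  rw [pvCountLeft.eq_def]
  split_ifs with h1 h2
  · have := pvCountLeft_nonneg chars (i - 1); omega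
  · omega
  · omega
termination_by (i + 1).toNat
decreasing_by omega

theorem pvCountRight_nonneg (chars : List Char) (j : Int) : 0 ≤ pvCountRight chars j := by
  rw [pvCountRight.eq_def]
  split_ifs with h1 h2
  · have := pvCountRight_nonneg chars (j + 1); omega
  · omega
  · omega
termination_by ((chars.length : Int) - j).toNat
decreasing_by omega

-- the loop invariant: A's loop adds exactly 2 * min(left 0-run from l-1, right 1-run from r+1)
theorem pvLoopA_eq (chars : List Char) (current l r : Int) (hlr : l < r) :
    pvLoopA chars current l r
      = current + 2 * min (pvCountLeft chars (l - 1)) (pvCountRight chars (r + 1)) := by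
  rw [pvLoopA.eq_def]
  by_cases h : l > 0 ∧ r < (chars.length : Int)
  · rw [dif_pos h]
    by_cases hb : l - 1 < 0 ∨ r + 1 = (chars.length : Int)
    · have hr0 : pvCountRight chars (r + 1) = 0 := by
        apply pvCountRight_out; omega
      rw [if_pos hb, hr0]
      have := pvCountLeft_nonneg chars (l - 1)
      omega
    · rw [if_neg hb]
      by_cases hc : PySem.List.pyGet? chars (l - 1) = some '0' ∧ PySem.List.pyGet? chars (r + 1) = some '1'
      · rw [if_pos hc, pvLoopA_eq chars (current + 2) (l - 1) (r + 1) (by omega)]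
        have hinL : 0 ≤ l - 1 ∧ l - 1 < (chars.length : Int) := by omega
        have hinR : 0 ≤ r + 1 ∧ r + 1 < (chars.length : Int) := by omega
        have hL : pvCountLeft chars (l - 1) = pvCountLeft chars (l - 1 - 1) + 1 := by
          rw [pvCountLeft.eq_def, dif_pos hinL, if_pos hc.1]
        have hR : pvCountRight chars (r + 1) = pvCountRight chars (r + 1 + 1) + 1 := by
          rw [pvCountRight.eq_def, dif_pos hinR, if_pos hc.2]
        rw [hL, hR]
        have := pvCountLeft_nonneg chars (l - 1 - 1)
        have := pvCountRight_nonneg chars (r + 1 + 1)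
        omega
      · rw [if_neg hc]
        -- mismatch at an in-range position: one of the two runs is 0
        have hinL : 0 ≤ l - 1 ∧ l - 1 < (chars.length : Int) := by omega
        have hinR : 0 ≤ r + 1 ∧ r + 1 < (chars.length : Int) := by omega
        have hmin : min (pvCountLeft chars (l - 1)) (pvCountRight chars (r + 1)) = 0 := by
          by_cases h0 : PySem.List.pyGet? chars (l - 1) = some '0'
          · have h1 : ¬ PySem.List.pyGet? chars (r + 1) = some '1' := by tauto
            have hr : pvCountRight chars (r + 1) = 0 := by
              rw [pvCountRight.eq_def, dif_pos hinR, if_neg h1]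
            have := pvCountLeft_nonneg chars (l - 1)
            omega
          · have hl : pvCountLeft chars (l - 1) = 0 := by
              rw [pvCountLeft.eq_def, dif_pos hinL, if_neg h0]
            have := pvCountRight_nonneg chars (r + 1)
            omega
        rw [hmin]; omega
  · rw [dif_neg h]
    have hmin : min (pvCountLeft chars (l - 1)) (pvCountRight chars (r + 1)) = 0 := by
      by_cases hl : l > 0
      · have hr : pvCountRight chars (r + 1) = 0 := by apply pvCountRight_out; omega
        have := pvCountLeft_nonneg chars (l - 1)
        omega
      · have hl0 : pvCountLeft chars (l - 1) = 0 := by apply pvCountLeft_out; omega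
        have := pvCountRight_nonneg chars (r + 1)
        omega
    rw [hmin]; omega
termination_by ((chars.length : Int) - r).toNat
decreasing_by omega

-- ===== VERDICT (by name: the statement is the Claim_ definition above) =====
theorem get_balanced_from_spec : Claim_equal_get_balanced_from := by
  intro index s _
  unfold Spec_get_balanced_from get_balanced_from get_balanced_from_alt
  rw [pvLoopA_eq _ _ _ _ (by omega)]
  have h2 : index + 1 + 1 = index + 2 := by ring
  rw [h2]
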